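-- pv_equiv track=rewrite | github.com/loganchoi/Programming-Languages-and-Translators | 1. Lexical Analyzer State Machine/lexer.py | integer
-- ===== SOURCE A (Python) =====
-- def integer(case):
--     digits = ['0','1','2','3','4','5','6','7','8','9']
--     sign = ['-','+']
--     state = 0
--
--     for s in case:
--         if state == 0:
--             if s in sign:
--                 state = 1
--             elif s in digits:
--                 state = 2
--             else:
--                 return False
--         elif state == 1:
--             if s in digits:
--                 state = 2
--             else:
--                 return False
--         elif state == 2:
--             if s in digits:
--                 state = 2
--             else:
--                 return False
--
--     if state == 2:
--         return True
--     else: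
--         return False
-- ===== SOURCE B (Python) =====
-- def integer(case):
--     if not case:
--         return False
--     body = case[1:] if case[0] in '+-' else case
--     return bool(body) and all(c in '0123456789' for c in body)
-- ===== Notes on version B (the rewrite author's own statement) =====
-- stated objective: simpler
-- what changed: Replaced the explicit DFA with a state variable by sign-prefix stripping followed by a single bulk all-digits check over the remaining characters.
import Mathlib
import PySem

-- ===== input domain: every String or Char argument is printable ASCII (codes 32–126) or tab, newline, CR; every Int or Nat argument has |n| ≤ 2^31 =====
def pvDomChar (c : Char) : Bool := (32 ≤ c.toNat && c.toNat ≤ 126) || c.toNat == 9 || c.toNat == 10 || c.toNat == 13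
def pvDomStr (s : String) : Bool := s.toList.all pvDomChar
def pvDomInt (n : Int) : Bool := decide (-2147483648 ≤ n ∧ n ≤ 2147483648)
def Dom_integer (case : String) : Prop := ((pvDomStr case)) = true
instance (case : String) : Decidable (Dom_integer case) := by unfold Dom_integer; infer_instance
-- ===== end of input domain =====

-- B replaces A's char-by-char DFA with sign-prefix stripping plus one bulk digit check (objective: simpler).

-- ===== PORT A =====
-- the loop of A: processes chars one by one carrying the state (0/1/2); returns early on a bad char
def integerLoop : List Char → Nat → Bool
  | [], st => st == 2
  | s :: rest, st =>
    if st == 0 then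
      if s ∈ ['-', '+'] then integerLoop rest 1
      else if s ∈ ['0','1','2','3','4','5','6','7','8','9'] then integerLoop rest 2
      else false
    else if st == 1 then
      if s ∈ ['0','1','2','3','4','5','6','7','8','9'] then integerLoop rest 2
      else false
    else
      if s ∈ ['0','1','2','3','4','5','6','7','8','9'] then integerLoop rest 2
      else false

def integer (case : String) : Bool := integerLoop case.toList 0

-- ===== PORT B =====
def pyDigit (c : Char) : Bool := c ∈ ['0','1','2','3','4','5','6','7','8','9']

def integer_alt (case : String) : Bool :=
  match case.toList with
  | [] => false
  | c :: rest =>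
      let body := if c ∈ ['+', '-'] then rest else c :: rest
      !body.isEmpty && body.all pyDigit

-- ===== PRECONDITION & SPEC =====
def Spec_integer (case : String) (out : Bool) : Prop := out = integer_alt case
instance (case : String) (out : Bool) : Decidable (Spec_integer case out) := by unfold Spec_integer; infer_instance

-- ===== CLAIM (what is proved, stated in full; the proofs are below) =====
def Claim_equal_integer : Prop := ∀ (case : String), Dom_integer case → Spec_integer case (integer case)

-- ===== LEMMAS AND PROOFS =====
-- in state 2 the loop accepts exactly when all remaining chars are digits
lemma integerLoop_two (l : List Char) : integerLoop l 2 = l.all pyDigit := by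
  induction l with
  | nil => rfl
  | cons c rest ih =>
    simp only [integerLoop, List.all_cons, pyDigit]
    by_cases h : c ∈ ['0','1','2','3','4','5','6','7','8','9'] <;> simp [h, ih]

-- in state 1 the loop accepts exactly when the rest is a non-empty all-digit string
lemma integerLoop_one (l : List Char) :
    integerLoop l 1 = (!l.isEmpty && l.all pyDigit) := by
  cases l with
  | nil => rfl
  | cons c rest =>
    simp only [integerLoop, List.isEmpty_cons, List.all_cons, pyDigit]
    by_cases h : c ∈ ['0','1','2','3','4','5','6','7','8','9'] <;>
      simp [h, integerLoop_two]

-- ===== VERDICT (by name: the statement is the Claim_ definition above) =====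
theorem integer_spec : Claim_equal_integer := by
  intro case _
  unfold Spec_integer integer integer_alt
  cases hl : case.toList with
  | nil => rfl
  | cons c rest =>
    simp only [integerLoop]
    by_cases hs : c ∈ ['-', '+']
    · have hs' : c ∈ ['+', '-'] := by
        simp only [List.mem_cons] at hs ⊢; tauto
      simp [hs, hs', integerLoop_one]
    · have hs' : c ∉ ['+', '-'] := by
        simp only [List.mem_cons] at hs ⊢; tauto
      by_cases hd : c ∈ ['0','1','2','3','4','5','6','7','8','9']
      · simp [hs, hs', hd, integerLoop_two, pyDigit]
      · simp [hs, hs', hd, pyDigit]
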